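-- pv_equiv track=rewrite | github.com/susylPearl/eod-auto-reporter | app/services/ai_summary_service.py | _parse_channel_summaries
-- ===== SOURCE A (Python) =====
-- from typing import Optional
--
-- def _parse_channel_summaries(raw: str, channel_names: list[str]) -> dict[str, str]:
--     """
--     Parse the AI response into per-channel summaries.
--
--     Handles two formats:
--       1. Structured: "#channel-name" header followed by bullets
--       2. Flat: all bullets lumped together (assign to first channel)
--     """
--     result: dict[str, str] = {}
--     current_channel: Optional[str] = None
--     current_lines: list[str] = []
--
--     for line in raw.splitlines():
--         stripped = line.strip()
--         if not stripped:
--             continue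
--
--         matched_channel = None
--         for name in channel_names:
--             if name.lower() in stripped.lower() and (
--                 stripped.startswith("#") or stripped.startswith("===")
--             ):
--                 matched_channel = name
--                 break
--
--         if matched_channel:
--             if current_channel and current_lines:
--                 result[current_channel] = "\n".join(current_lines)
--             current_channel = matched_channel
--             current_lines = []
--         else:
--             clean = stripped.lstrip("-•*").strip()
--             if clean:
--                 current_lines.append(f"• {clean}")
--
--     if current_channel and current_lines:
--         result[current_channel] = "\n".join(current_lines)
--
--     if not result and current_lines:
--         fallback = channel_names[0] if channel_names else "general"
--         result[fallback] = "\n".join(current_lines)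
--
--     return result
-- ===== SOURCE B (Python) =====
-- def _parse_channel_summaries(raw: str, channel_names: list[str]) -> dict[str, str]:
--     # Phase 1: classify each non-empty stripped line as a header token or a bullet token.
--     toks = []
--     for line in raw.splitlines():
--         s = line.strip()
--         if not s:
--             continue
--         name = None
--         if s.startswith("#") or s.startswith("==="):
--             name = next((n for n in channel_names if n.lower() in s.lower()), None)
--         if name:  # a header line resolved to a (non-empty) channel name
--             toks.append((True, name))
--         else:
--             clean = s.lstrip("-\u2022*").strip()
--             if clean:
--                 toks.append((False, "\u2022 " + clean))
--     # Phase 2: drop bullets before the first header, then cut into (channel, bullets) segments.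
--     rest = toks
--     while rest and not rest[0][0]:
--         rest = rest[1:]
--     result: dict[str, str] = {}
--     if not rest:  # no header at all: all bullets go to the first channel (or 'general')
--         bullets = [v for _, v in toks]
--         if bullets:
--             result[channel_names[0] if channel_names else "general"] = "\n".join(bullets)
--         return result
--     segments = []
--     for h, v in rest:
--         if h:
--             segments.append((v, []))
--         else:
--             segments[-1][1].append(v)
--     for ch, bullets in segments:
--         if bullets:
--             result[ch] = "\n".join(bullets)
--     return result
-- ===== Notes on version B (the rewrite author's own statement) =====
-- stated objective: faster
-- what changed: Replaced A's single accumulating pass (dict + current-channel + current-lines state) by a two-phase pipeline — classify lines into header/bullet tokens, then cut the token list into (channel, bullets) segments — and the classifier tests the '#'/'===' prefix before scanning channel names, so non-header lines skip the per-name lowercase substring scan that A performs on every line.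
import Mathlib
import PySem

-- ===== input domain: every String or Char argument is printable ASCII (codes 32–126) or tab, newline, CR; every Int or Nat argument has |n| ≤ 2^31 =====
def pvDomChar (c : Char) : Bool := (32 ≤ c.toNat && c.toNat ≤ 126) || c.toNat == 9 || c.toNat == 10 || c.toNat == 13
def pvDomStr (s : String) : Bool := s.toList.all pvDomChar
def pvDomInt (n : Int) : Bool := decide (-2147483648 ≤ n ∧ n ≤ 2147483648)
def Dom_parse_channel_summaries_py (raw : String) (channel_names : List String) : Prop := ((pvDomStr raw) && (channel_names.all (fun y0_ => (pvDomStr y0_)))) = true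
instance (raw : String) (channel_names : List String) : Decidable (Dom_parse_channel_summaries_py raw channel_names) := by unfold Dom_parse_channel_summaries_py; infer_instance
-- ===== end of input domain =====

-- B replaces A's single accumulating pass (dict + current-channel + current-lines state) by a
-- two-phase pipeline (classify lines into header/bullet tokens, then cut into segments), testing
-- the '#'/'===' prefix before scanning channel names (measured faster). Return values only;
-- neither program mutates its arguments.


-- ===== PORT A =====
-- stripped.lstrip("-•*").strip(): lstrip(chars) ported by hand as dropWhile on code points (exact)
def pvAClean (stripped : String) : String :=
  PySem.Str.strip (String.ofList (stripped.toList.dropWhile (fun c => c == '-' || c == '•' || c == '*')))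

-- the inner 'for name in channel_names: … break' loop
def pvAMatch (stripped : String) : List String → Option String
  | [] => none
  | n :: rest =>
    if PySem.Str.isIn (PySem.Str.lower n) (PySem.Str.lower stripped) &&
       (PySem.Str.startswith stripped "#" || PySem.Str.startswith stripped "===") then some n
    else pvAMatch stripped rest

-- 'if current_channel and current_lines: result[current_channel] = "\n".join(current_lines)'
def pvAFlush (d : PySem.Dict String String) (cur : Option String) (ls : List String) :
    PySem.Dict String String :=
  match cur with
  | some c => if c ≠ "" ∧ ls ≠ [] then d.insert c (PySem.Str.join "\n" ls) else d
  | none => d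

-- one iteration of A's 'for line in raw.splitlines()' loop over state (result, current_channel, current_lines)
def pvAStep (channel_names : List String)
    (st : PySem.Dict String String × Option String × List String) (line : String) :
    PySem.Dict String String × Option String × List String :=
  let stripped := PySem.Str.strip line
  if stripped = "" then st
  else
    match pvAMatch stripped channel_names with
    | some m =>
      if m ≠ "" then (pvAFlush st.1 st.2.1 st.2.2, some m, [])
      else
        let clean := pvAClean stripped
        if clean = "" then st else (st.1, st.2.1, st.2.2 ++ ["• " ++ clean])
    | none =>
      let clean := pvAClean stripped
      if clean = "" then st else (st.1, st.2.1, st.2.2 ++ ["• " ++ clean])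

def parse_channel_summaries_py (raw : String) (channel_names : List String) :
    List (String × String) :=
  let st := (PySem.Str.splitlines raw).foldl (pvAStep channel_names)
      ((PySem.Dict.empty : PySem.Dict String String), none, [])
  let d := pvAFlush st.1 st.2.1 st.2.2
  let d2 := if d.items = [] ∧ st.2.2 ≠ [] then
      d.insert (match channel_names with | [] => "general" | n :: _ => n)
        (PySem.Str.join "\n" st.2.2)
    else d
  d2.items

-- ===== PORT B =====
def pvBClean (s : String) : String :=
  PySem.Str.strip (String.ofList (s.toList.dropWhile (fun c => c == '-' || c == '•' || c == '*')))

-- phase 1: classify one line (none = skipped line)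
def pvBClassify (channel_names : List String) (line : String) : Option (Bool × String) :=
  let s := PySem.Str.strip line
  if s = "" then none
  else
    let name : Option String :=
      if PySem.Str.startswith s "#" || PySem.Str.startswith s "===" then
        channel_names.find? (fun n => PySem.Str.isIn (PySem.Str.lower n) (PySem.Str.lower s))
      else none
    match name with
    | some n =>
      if n ≠ "" then some (true, n)
      else
        let clean := pvBClean s
        if clean = "" then none else some (false, "• " ++ clean)
    | none =>
      let clean := pvBClean s
      if clean = "" then none else some (false, "• " ++ clean)

-- phase 2: the 'for h, v in rest' grouping loop (current open segment = (c, bs))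
def pvBCollect (c : String) (bs : List String) : List (Bool × String) → List (String × List String)
  | [] => [(c, bs)]
  | (true, n) :: ts => (c, bs) :: pvBCollect n [] ts
  | (false, v) :: ts => pvBCollect c (bs ++ [v]) ts

-- 'if bullets: result[ch] = "\n".join(bullets)'
def pvBIns (d : PySem.Dict String String) (seg : String × List String) : PySem.Dict String String :=
  if seg.2 ≠ [] then d.insert seg.1 (PySem.Str.join "\n" seg.2) else d

def parse_channel_summaries_py_alt (raw : String) (channel_names : List String) :
    List (String × String) :=
  let toks := (PySem.Str.splitlines raw).filterMap (pvBClassify channel_names)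
  let rest := toks.dropWhile (fun t => !t.1)
  match rest with
  | [] =>
    let bullets := toks.map (·.2)
    if bullets ≠ [] then
      ((PySem.Dict.empty : PySem.Dict String String).insert
        (match channel_names with | [] => "general" | n :: _ => n)
        (PySem.Str.join "\n" bullets)).items
    else ([] : List (String × String))
  | (_, n) :: ts => ((pvBCollect n [] ts).foldl pvBIns PySem.Dict.empty).items

-- ===== PRECONDITION & SPEC =====
def Spec_parse_channel_summaries_py (raw : String) (channel_names : List String) (out : List (String × String)) : Prop := out = parse_channel_summaries_py_alt raw channel_names
instance (raw : String) (channel_names : List String) (out : List (String × String)) : Decidable (Spec_parse_channel_summaries_py raw channel_names out) := by unfold Spec_parse_channel_summaries_py; infer_instance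

-- ===== CLAIM (what is proved, stated in full; the proofs are below) =====
def Claim_equal_parse_channel_summaries_py : Prop := ∀ (raw : String) (channel_names : List String), Dom_parse_channel_summaries_py raw channel_names → Spec_parse_channel_summaries_py raw channel_names (parse_channel_summaries_py raw channel_names)

-- ===== LEMMAS AND PROOFS =====

theorem pvAFlush_none (d : PySem.Dict String String) (ls : List String) :
    pvAFlush d none ls = d := rfl

-- A's per-line step, restated on a classified token
def pvTokStep (st : PySem.Dict String String × Option String × List String) (t : Bool × String) :
    PySem.Dict String String × Option String × List String :=
  match t with
  | (true, n) => (pvAFlush st.1 st.2.1 st.2.2, some n, [])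
  | (false, v) => (st.1, st.2.1, st.2.2 ++ [v])

theorem pvAMatch_eq (s : String) (cn : List String) :
    pvAMatch s cn =
      if (PySem.Str.startswith s "#" || PySem.Str.startswith s "===") = true then
        cn.find? (fun n => PySem.Str.isIn (PySem.Str.lower n) (PySem.Str.lower s))
      else none := by
  induction cn with
  | nil => cases h : (PySem.Str.startswith s "#" || PySem.Str.startswith s "===") <;>
      simp [pvAMatch]
  | cons n rest ih =>
    cases h : (PySem.Str.startswith s "#" || PySem.Str.startswith s "===") <;>
      cases h2 : PySem.Str.isIn (PySem.Str.lower n) (PySem.Str.lower s) <;>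
        simp_all [pvAMatch, List.find?]

theorem pv_step_bridge (cn : List String)
    (st : PySem.Dict String String × Option String × List String) (line : String) :
    pvAStep cn st line =
      match pvBClassify cn line with
      | none => st
      | some t => pvTokStep st t := by
  unfold pvAStep pvBClassify
  by_cases hs : PySem.Str.strip line = ""
  · simp [hs]
  · simp only [hs, if_false]
    rw [pvAMatch_eq]
    cases hp : (PySem.Str.startswith (PySem.Str.strip line) "#" ||
        PySem.Str.startswith (PySem.Str.strip line) "===") <;>
      simp only [if_true, if_false, Bool.false_eq_true]
    · rw [show pvAClean = pvBClean from rfl]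
      by_cases hc : pvBClean (PySem.Str.strip line) = "" <;> simp [pvTokStep, hc]
    · cases hf : (cn.find? fun n =>
          PySem.Str.isIn (PySem.Str.lower n) (PySem.Str.lower (PySem.Str.strip line))) with
      | none =>
        rw [show pvAClean = pvBClean from rfl]
        by_cases hc : pvBClean (PySem.Str.strip line) = "" <;> simp [pvTokStep, hc]
      | some n =>
        by_cases hn : n = ""
        · rw [show pvAClean = pvBClean from rfl]
          by_cases hc : pvBClean (PySem.Str.strip line) = "" <;> simp [pvTokStep, hn, hc]
        · simp [pvTokStep, hn]

theorem pv_fold_bridge (cn : List String) (lines : List String)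
    (st : PySem.Dict String String × Option String × List String) :
    lines.foldl (pvAStep cn) st = (lines.filterMap (pvBClassify cn)).foldl pvTokStep st := by
  induction lines generalizing st with
  | nil => rfl
  | cons l ls ih =>
    simp only [List.foldl_cons, List.filterMap_cons]
    rw [pv_step_bridge]
    cases h : pvBClassify cn l <;> simp [ih]

-- a run of bullet tokens only appends to current_lines
theorem pv_bullets_fold (ts : List (Bool × String)) (h : ∀ t ∈ ts, t.1 = false)
    (d : PySem.Dict String String) (cur : Option String) (ls : List String) :
    ts.foldl pvTokStep (d, cur, ls) = (d, cur, ls ++ ts.map (·.2)) := by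
  induction ts generalizing ls with
  | nil => simp
  | cons t ts ih =>
    obtain ⟨b, v⟩ := t
    have hb : b = false := h (b, v) (List.mem_cons_self)
    subst hb
    simp only [List.foldl_cons, pvTokStep, List.map_cons]
    rw [ih (fun t ht => h t (List.mem_cons_of_mem _ ht))]
    simp

-- after the first header, A's interleaved flushes compute exactly the fold of B's segments
theorem pv_collect_fold (ts : List (Bool × String)) (c : String) (ls : List String)
    (d : PySem.Dict String String) (hc : c ≠ "")
    (hts : ∀ t ∈ ts, t.1 = true → t.2 ≠ "") :
    (let st := ts.foldl pvTokStep (d, some c, ls)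
     pvAFlush st.1 st.2.1 st.2.2 = (pvBCollect c ls ts).foldl pvBIns d) ∧
    (∃ c', (ts.foldl pvTokStep (d, some c, ls)).2.1 = some c' ∧ c' ≠ "") := by
  induction ts generalizing c ls d with
  | nil =>
    refine ⟨?_, c, rfl, hc⟩
    simp [pvAFlush, pvBCollect, pvBIns, hc]
  | cons t ts ih =>
    obtain ⟨b, v⟩ := t
    cases b
    · simpa [pvTokStep, pvBCollect] using
        ih c (ls ++ [v]) d hc (fun t ht h1 => hts t (List.mem_cons_of_mem _ ht) h1)
    · have hv : v ≠ "" := hts (true, v) (List.mem_cons_self) rfl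
      have := ih v [] (pvAFlush d (some c) ls) hv
        (fun t ht h1 => hts t (List.mem_cons_of_mem _ ht) h1)
      simp only [List.foldl_cons, pvTokStep] at this ⊢
      refine ⟨?_, this.2⟩
      rw [this.1]
      simp [pvBCollect, pvAFlush, pvBIns, hc]

theorem pv_insert_items_ne_nil (d : PySem.Dict String String) (k v : String) :
    (d.insert k v).items ≠ [] := by
  intro h
  have h1 : (d.insert k v).get? k = some v := PySem.Dict.get?_insert_self d k v
  have h2 : d.insert k v = PySem.Dict.mk [] := PySem.Dict.ext h
  rw [h2] at h1
  simp [PySem.Dict.get?] at h1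

theorem pv_classify_header_ne (cn : List String) (line : String) (t : Bool × String)
    (h : pvBClassify cn line = some t) (ht : t.1 = true) : t.2 ≠ "" := by
  obtain ⟨b, v⟩ := t
  cases b
  · simp at ht
  · unfold pvBClassify at h
    simp only [] at h
    split at h
    · simp at h
    · split at h <;> (try split at h) <;> (try split at h) <;> simp_all

-- ===== VERDICT (by name: the statement is the Claim_ definition above) =====
theorem parse_channel_summaries_py_spec : Claim_equal_parse_channel_summaries_py := by
  intro raw cn _
  unfold Spec_parse_channel_summaries_py parse_channel_summaries_py parse_channel_summaries_py_alt
  simp only []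
  rw [pv_fold_bridge]
  set toks := (PySem.Str.splitlines raw).filterMap (pvBClassify cn) with htoks
  have hhdr : ∀ t ∈ toks, t.1 = true → t.2 ≠ "" := by
    intro t ht h1
    rw [htoks] at ht
    obtain ⟨line, _, hcl⟩ := List.mem_filterMap.mp ht
    exact pv_classify_header_ne cn line t hcl h1
  cases hrest : toks.dropWhile (fun t => !t.1) with
  | nil =>
    have hall : ∀ t ∈ toks, t.1 = false := by
      intro t ht
      have := List.dropWhile_eq_nil_iff.mp hrest t ht
      simpa using this
    rw [pv_bullets_fold toks hall]
    simp only [pvAFlush]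
    by_cases he : toks = [] <;>
      simp [he, show (PySem.Dict.empty : PySem.Dict String String).items = [] from rfl]
  | cons t ts =>
    obtain ⟨b, n⟩ := t
    have hsplit : toks = toks.takeWhile (fun t => !t.1) ++ (b, n) :: ts := by
      rw [← hrest, List.takeWhile_append_dropWhile]
    have hpre : ∀ t ∈ toks.takeWhile (fun t : Bool × String => !t.1), t.1 = false := by
      intro t ht
      have := List.mem_takeWhile_imp ht
      simpa using this
    have hb : b = true := by
      have := List.head?_dropWhile_not (fun t : Bool × String => !t.1) toks
      rw [hrest] at this
      simpa using this
    subst hb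
    have hmem : ((true, n) : Bool × String) ∈ toks := by
      rw [hsplit]; exact List.mem_append_right _ (List.mem_cons_self)
    have hn : n ≠ "" := hhdr (true, n) hmem rfl
    have hts : ∀ t ∈ ts, t.1 = true → t.2 ≠ "" := by
      intro t ht h1
      refine hhdr t ?_ h1
      rw [hsplit]
      exact List.mem_append_right _ (List.mem_cons_of_mem _ ht)
    conv_lhs => rw [hsplit]
    rw [List.foldl_append, pv_bullets_fold _ hpre]
    simp only [List.foldl_cons, pvTokStep, pvAFlush_none]
    obtain ⟨heq, c', hc', hc'ne⟩ := pv_collect_fold ts n [] PySem.Dict.empty hn hts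
    simp only at heq
    rw [heq]
    by_cases hls : (ts.foldl pvTokStep (PySem.Dict.empty, some n, [])).2.2 = []
    · simp [hls]
    · have : ((pvBCollect n [] ts).foldl pvBIns PySem.Dict.empty).items ≠ [] := by
        rw [← heq]
        rw [hc']
        simp only [pvAFlush]
        rw [if_pos ⟨hc'ne, hls⟩]
        exact pv_insert_items_ne_nil _ _ _
      simp [hls, this]
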